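-- pv_equiv track=rewrite | github.com/Sambit003/CODING | Python/4th_Sem_Python_lab/11-4-23/Digits&TheirSumProdFunc.py | digitsOps
-- ===== SOURCE A (Python) =====
-- def digitsOps(number):
--     count = 0
--     sum = 0
--     product = 1
--
--     while number > 0:
--         count += 1
--         sum += number % 10
--         product *= number % 10
--         number //= 10
--
--     return count, sum, product
-- ===== SOURCE B (Python) =====
-- def digitsOps(number):
--     if number <= 0:
--         # A's while loop never runs for number <= 0
--         return 0, 0, 1
--     s = str(number)
--     digits = [int(c) for c in s]
--     product = 1
--     for d in digits:
--         product *= d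
--     return len(s), sum(digits), product
-- ===== Notes on version B (the rewrite author's own statement) =====
-- stated objective: idiomatic
-- what changed: B reads the digits from the decimal string representation (most-significant first) instead of extracting them arithmetically LSB-first with modulo and floor division in a while loop.
import Mathlib
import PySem

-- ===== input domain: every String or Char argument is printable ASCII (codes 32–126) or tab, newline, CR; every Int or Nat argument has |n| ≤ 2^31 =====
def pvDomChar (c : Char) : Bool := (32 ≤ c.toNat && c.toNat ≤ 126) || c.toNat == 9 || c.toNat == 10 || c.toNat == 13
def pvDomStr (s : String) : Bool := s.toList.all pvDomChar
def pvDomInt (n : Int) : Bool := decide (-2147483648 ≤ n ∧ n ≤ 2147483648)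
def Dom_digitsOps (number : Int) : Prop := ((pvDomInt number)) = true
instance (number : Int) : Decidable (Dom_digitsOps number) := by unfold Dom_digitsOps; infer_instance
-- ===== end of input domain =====

-- B processes the digits via str(number) instead of A's %10 / //10 while loop; same values everywhere.

-- ===== PORT A =====
-- termination helper for A's while loop: number //= 10 strictly shrinks a positive number
theorem pvFloordiv10_toNat_lt (n : Int) (h : 0 < n) :
    (PySem.Int.floordiv n 10).toNat < n.toNat := by
  simp only [PySem.Int.floordiv, Int.fdiv_eq_ediv,
    if_pos (Or.inl (by omega : (0:Int) ≤ 10))]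
  omega

-- the while loop of A, with its four state variables
def pvLoopA (number count sum prod : Int) : Int × Int × Int :=
  if _h : number > 0 then
    pvLoopA (PySem.Int.floordiv number 10) (count + 1)
      (sum + PySem.Int.mod number 10) (prod * PySem.Int.mod number 10)
  else (count, sum, prod)
termination_by number.toNat
decreasing_by exact pvFloordiv10_toNat_lt number _h

def digitsOps (number : Int) : Int × Int × Int := pvLoopA number 0 0 1

-- ===== PORT B =====
-- int(c) for a single character c (exact for the digit characters produced by str of a positive int)
def pvCharVal (c : Char) : Int := (PySem.Int.ofChars? [c]).getD 0

def digitsOps_alt (number : Int) : Int × Int × Int :=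
  if number ≤ 0 then (0, 0, 1)
  else
    let cs := (PySem.Int.toStr number).toList
    let ds := cs.map pvCharVal
    ((cs.length : Int), ds.sum, ds.foldl (fun p d => p * d) 1)

-- ===== PRECONDITION & SPEC =====
def Spec_digitsOps (number : Int) (out : Int × Int × Int) : Prop := out = digitsOps_alt number
instance (number : Int) (out : Int × Int × Int) : Decidable (Spec_digitsOps number out) := by unfold Spec_digitsOps; infer_instance

-- ===== CLAIM (what is proved, stated in full; the proofs are below) =====
def Claim_equal_digitsOps : Prop := ∀ (number : Int), Dom_digitsOps number → Spec_digitsOps number (digitsOps number)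

-- ===== LEMMAS AND PROOFS =====

-- A's loop computes count/sum/product of the base-10 digit list of number.toNat
theorem pvLoopA_eq (m : Nat) : ∀ c s p : Int, pvLoopA (m : Int) c s p =
    (c + (Nat.digits 10 m).length,
     s + ((Nat.digits 10 m).map (Nat.cast : Nat → Int)).sum,
     p * ((Nat.digits 10 m).map (Nat.cast : Nat → Int)).prod) := by
  induction m using Nat.strong_induction_on with
  | _ m ih =>
    intro c s p
    rw [pvLoopA]
    by_cases hm : 0 < m
    · have hdiv : PySem.Int.floordiv ((m : Nat) : Int) 10 = (((m / 10 : Nat) : Nat) : Int) := by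
        simp only [PySem.Int.floordiv, Int.fdiv_eq_ediv,
          if_pos (Or.inl (by omega : (0:Int) ≤ 10))]
        omega
      have hmod : PySem.Int.mod ((m : Nat) : Int) 10 = (((m % 10 : Nat) : Nat) : Int) := by
        simp only [PySem.Int.mod, Int.fmod_eq_emod,
          if_pos (Or.inl (by omega : (0:Int) ≤ 10))]
        omega
      rw [dif_pos (by omega : ((m : Nat) : Int) > 0), hdiv, hmod,
        ih (m / 10) (Nat.div_lt_self hm (by omega)),
        Nat.digits_def' (by omega : 1 < 10) hm]
      simp only [List.map_cons, List.length_cons, List.sum_cons, List.prod_cons]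
      simp only [Prod.mk.injEq]
      refine ⟨by push_cast; ring, by ring, by ring⟩
    · have h0 : m = 0 := by omega
      rw [dif_neg (by omega : ¬ ((m : Nat) : Int) > 0)]
      simp [h0]

-- Nat.toDigits (used by str) is the reversed digitChar image of Nat.digits
theorem pvToDigitsCore_eq : ∀ (f m : Nat) (acc : List Char), 0 < m → m < f →
    Nat.toDigitsCore 10 f m acc = ((Nat.digits 10 m).map Nat.digitChar).reverse ++ acc := by
  intro f
  induction f with
  | zero => intro m acc h hf; omega
  | succ f ih =>
    intro m acc hm hf
    rw [Nat.toDigitsCore, Nat.digits_def' (by omega : 1 < 10) hm]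
    by_cases hq : m / 10 = 0
    · simp [hq]
    · rw [if_neg hq, ih (m / 10) _ (by omega) (by omega : m / 10 < f)]
      simp

theorem pvToDigits_eq (m : Nat) (h : 0 < m) :
    Nat.toDigits 10 m = ((Nat.digits 10 m).map Nat.digitChar).reverse := by
  simpa using pvToDigitsCore_eq (m + 1) m [] h (Nat.lt_succ_self m)

theorem pvCharVal_digitChar (d : Nat) (h : d < 10) : pvCharVal (Nat.digitChar d) = (d : Int) := by
  interval_cases d <;> decide

theorem pvFoldl_mul (v : List Int) : ∀ a : Int, v.foldl (fun p d => p * d) a = a * v.prod := by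
  induction v with
  | nil => simp
  | cons x xs ih => intro a; simp [ih, mul_assoc]

-- ===== VERDICT (by name: the statement is the Claim_ definition above) =====
theorem digitsOps_spec : Claim_equal_digitsOps := by
  intro number _
  unfold Spec_digitsOps digitsOps digitsOps_alt
  by_cases hle : number ≤ 0
  · rw [pvLoopA]; simp [hle, not_lt.mpr hle]
  · rw [not_le] at hle
    have hm : ((number.toNat : Nat) : Int) = number := by omega
    have hpos : 0 < number.toNat := by omega
    rw [← hm, pvLoopA_eq]
    have hlist : (PySem.Int.toStr ((number.toNat : Nat) : Int)).toList
        = ((Nat.digits 10 number.toNat).map Nat.digitChar).reverse := by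
      rw [PySem.Int.toList_toStr]
      simp only [PySem.Int.toChars]
      rw [if_neg (by omega)]
      have : (((number.toNat : Nat) : Int)).toNat = number.toNat := by omega
      rw [this, pvToDigits_eq _ hpos]
    have hmap : ((Nat.digits 10 number.toNat).map Nat.digitChar).map pvCharVal
        = (Nat.digits 10 number.toNat).map (Nat.cast : Nat → Int) := by
      rw [List.map_map]
      refine List.map_congr_left ?_
      intro d hd
      simp only [Function.comp]
      exact pvCharVal_digitChar d (Nat.digits_lt_base (by norm_num) hd)
    rw [if_neg (by omega)]
    simp only [hlist, List.map_reverse, hmap, List.length_reverse, List.length_map,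
      List.sum_reverse, pvFoldl_mul, List.prod_reverse]
    simp
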